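-- pv_equiv track=rewrite | github.com/wuwupeak/PythonBook | 020进阶部分/060dataVisualization/wordsAnalysisFunction.py | analyzeWordsCount
-- ===== SOURCE A (Python) =====
-- def analyzeWordsCount (wordsCleaned,minCount): #定义基本的统计函数
--         wordsUnique = []
--         wordsCount = {}
--         for word in wordsCleaned:
--                 if word not in wordsUnique:
--                         wordsUnique.append(word)
--         for wordUnique in wordsUnique:
--                 wordCount = wordsCleaned.count(wordUnique)
--                 if wordCount >= minCount: #此处利用参数来选择最小的词频
--                         wordsCount[wordUnique] = wordCount
--         wordsCountOrder = sorted(wordsCount.items(),key = lambda item:item[1]) #使用该排序将字典变成有序的元组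
--         wordsCountDict = dict(wordsCountOrder) #将有序的元组转换为字典
--         return wordsCountDict #返回字典
-- ===== SOURCE B (Python) =====
-- def analyzeWordsCount(wordsCleaned, minCount):
--     # Run-length grouping over a sorted copy instead of per-word .count scans.
--     wordsSorted = sorted(wordsCleaned)
--     counts = {}
--     i = 0
--     n = len(wordsSorted)
--     while i < n:
--         j = i
--         while j < n and wordsSorted[j] == wordsSorted[i]:
--             j += 1
--         counts[wordsSorted[i]] = j - i
--         i = j
--     kept = {word: counts[word] for word in wordsCleaned if counts[word] >= minCount}
--     return dict(sorted(kept.items(), key=lambda item: item[1]))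
-- ===== Notes on version B (the rewrite author's own statement) =====
-- stated objective: faster
-- what changed: Replaces A's uniqueness-list membership scans plus a full wordsCleaned.count pass per unique word by sorting a copy once, counting each word in a single run-length sweep over the sorted copy, then keeping first-occurrence order via a dict comprehension before the final sort by count.
import Mathlib
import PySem

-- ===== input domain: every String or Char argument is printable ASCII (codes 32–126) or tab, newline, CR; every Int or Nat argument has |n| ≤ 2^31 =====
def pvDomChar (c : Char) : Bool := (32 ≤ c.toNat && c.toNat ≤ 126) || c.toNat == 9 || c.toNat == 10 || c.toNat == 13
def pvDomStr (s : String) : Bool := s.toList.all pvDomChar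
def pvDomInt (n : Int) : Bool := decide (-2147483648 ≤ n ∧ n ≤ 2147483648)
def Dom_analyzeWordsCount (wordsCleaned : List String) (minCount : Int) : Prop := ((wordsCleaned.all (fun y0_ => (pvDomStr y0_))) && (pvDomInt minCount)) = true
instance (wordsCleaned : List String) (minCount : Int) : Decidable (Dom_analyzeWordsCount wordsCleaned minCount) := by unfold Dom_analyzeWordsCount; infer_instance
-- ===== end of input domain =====

-- B sorts a copy once and counts each word by run-length grouping over the sorted copy, instead of A's uniqueness-list scans and per-word .count passes; same return value.
-- ===== PORT A =====
def analyzeWordsCount (wordsCleaned : List String) (minCount : Int) : List (String × Int) :=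
  let wordsUnique : List String :=
    wordsCleaned.foldl (fun u word => if word ∈ u then u else u ++ [word]) []
  let wordsCount : PySem.Dict String Int :=
    wordsUnique.foldl (fun d wordUnique =>
      let wordCount : Int := (wordsCleaned.count wordUnique : Int)
      if minCount ≤ wordCount then d.insert wordUnique wordCount else d) PySem.Dict.empty
  let wordsCountOrder := PySem.List.sorted wordsCount.items (fun item => item.2) false
  (PySem.Dict.ofList wordsCountOrder).items

-- ===== PORT B =====
-- the 'while i < n' loop of Source B: each step takes the maximal run of the first remaining word
-- (the inner 'while wordsSorted[j] == wordsSorted[i]' is the takeWhile/dropWhile split) and records its length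
def runLengthLoop : List String → PySem.Dict String Int → PySem.Dict String Int
  | [], counts => counts
  | x :: rest, counts =>
    let run := rest.takeWhile (fun y => y == x)
    runLengthLoop (rest.dropWhile (fun y => y == x)) (counts.insert x (1 + run.length))
termination_by s => s.length
decreasing_by
  have := List.length_dropWhile_le (fun y => y == x) rest
  simp; omega

def analyzeWordsCount_alt (wordsCleaned : List String) (minCount : Int) : List (String × Int) :=
  let wordsSorted := PySem.List.sorted wordsCleaned (fun w => w) false
  let counts := runLengthLoop wordsSorted PySem.Dict.empty
  let kept : PySem.Dict String Int :=
    wordsCleaned.foldl (fun d word =>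
      if minCount ≤ counts.getD word 0 then d.insert word (counts.getD word 0) else d) PySem.Dict.empty
  (PySem.Dict.ofList (PySem.List.sorted kept.items (fun item => item.2) false)).items

-- ===== PRECONDITION & SPEC =====
def Spec_analyzeWordsCount (wordsCleaned : List String) (minCount : Int) (out : List (String × Int)) : Prop := out = analyzeWordsCount_alt wordsCleaned minCount
instance (wordsCleaned : List String) (minCount : Int) (out : List (String × Int)) : Decidable (Spec_analyzeWordsCount wordsCleaned minCount out) := by unfold Spec_analyzeWordsCount; infer_instance

-- ===== CLAIM (what is proved, stated in full; the proofs are below) =====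
def Claim_equal_analyzeWordsCount : Prop := ∀ (wordsCleaned : List String) (minCount : Int), Dom_analyzeWordsCount wordsCleaned minCount → Spec_analyzeWordsCount wordsCleaned minCount (analyzeWordsCount wordsCleaned minCount)

-- ===== LEMMAS AND PROOFS =====

-- run-length counting over a ≤-sorted list yields every element's total multiplicity
theorem runLengthLoop_getD (s : List String) (d : PySem.Dict String Int) (w : String)
    (hs : s.Pairwise (· ≤ ·)) :
    (runLengthLoop s d).getD w 0 = if w ∈ s then (s.count w : Int) else d.getD w 0 := by
  induction s, d using runLengthLoop.induct with
  | case1 d => simp [runLengthLoop]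
  | case2 x rest d t ih =>
    rw [runLengthLoop]
    have ht : t = rest.takeWhile (fun y => y == x) := rfl
    set r := rest.dropWhile (fun y => y == x) with hr
    have hrest : t ++ r = rest := by rw [ht, hr]; exact List.takeWhile_append_dropWhile
    have htx : ∀ y ∈ t, y = x := by
      intro y hy
      rw [ht] at hy
      simpa using List.mem_takeWhile_imp hy
    have hxle : ∀ y ∈ rest, x ≤ y := (List.pairwise_cons.mp hs).1
    have hrp : rest.Pairwise (· ≤ ·) := (List.pairwise_cons.mp hs).2
    have hrpr : r.Pairwise (· ≤ ·) := hrp.sublist (List.dropWhile_sublist _)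
    have hxr : x ∉ r := by
      intro hmem
      rcases hcase : r with _ | ⟨y, r'⟩
      · simp [hcase] at hmem
      · have hne : ¬ (y == x) = true := by
          have hh := List.head_dropWhile_not (fun y => y == x) (l := rest) (by rw [← hr, hcase]; simp)
          simpa [← hr, hcase] using hh
        have hyx : y ≠ x := by simpa using hne
        have hxy : x < y := lt_of_le_of_ne (hxle y (by rw [← hrest, hcase]; simp)) (Ne.symm hyx)
        rw [hcase] at hmem
        rcases List.mem_cons.mp hmem with h | h
        · exact hyx h.symm
        · have : y ≤ x := by
            have hpr := hrpr; rw [hcase] at hpr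
            exact (List.pairwise_cons.mp hpr).1 x h
          exact absurd hxy (not_lt.mpr this)
    rw [ih hrpr]
    have hcount_t : t.count x = t.length := List.count_eq_length.mpr (fun b hb => (htx b hb).symm)
    by_cases hwr : w ∈ r
    · have hwx : w ≠ x := fun h => hxr (h ▸ hwr)
      rw [if_pos hwr, if_pos (by rw [← hrest] at *; simp [hwr])]
      have : (x :: rest).count w = r.count w := by
        rw [← hrest]
        have hwt : w ∉ t := fun h => hwx (htx w h)
        simp [List.count_append, List.count_eq_zero.mpr hwt, Ne.symm hwx]
      rw [this]
    · rw [if_neg hwr]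
      by_cases hwx : w = x
      · subst hwx
        rw [PySem.Dict.getD_insert_self]
        rw [if_pos (List.mem_cons_self)]
        have : (w :: rest).count w = 1 + t.length := by
          rw [← hrest]
          simp [List.count_append, hcount_t, List.count_eq_zero.mpr hxr]
          omega
        rw [this]
        push_cast
        ring
      · rw [PySem.Dict.getD_insert_of_ne _ _ _ hwx]
        have hwt : w ∉ t := fun h => hwx (htx w h)
        rw [if_neg (by rw [← hrest]; simp [hwx, hwt, hwr])]

-- a conditional insert loop whose value depends only on the key builds exactly the
-- filtered first-occurrence items (duplicate keys overwrite in place with the same pair)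
theorem items_cond_insert (p : String → Prop) [DecidablePred p] (v : String → Int) (xs : List String) :
    (xs.foldl (fun d w => if p w then d.insert w (v w) else d) PySem.Dict.empty).items
      = ((PySem.Set.ofList xs).filter (fun w => decide (p w))).map (fun w => (w, v w)) := by
  induction xs using List.reverseRecOn with
  | nil => simp [PySem.Set.ofList, PySem.Dict.empty]
  | append_singleton xs w ih =>
    rw [List.foldl_append, List.foldl_cons, List.foldl_nil, PySem.Set.ofList_append_singleton,
        PySem.Set.add_eq_ite]
    set D := xs.foldl (fun d w => if p w then d.insert w (v w) else d) PySem.Dict.empty with hD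
    have hkeys : D.keys = (PySem.Set.ofList xs).filter (fun w => decide (p w)) := by
      simp only [PySem.Dict.keys, ih, List.map_map]
      exact List.map_id'' (fun a => rfl) _
    by_cases hw : w ∈ PySem.Set.ofList xs
    · rw [if_pos hw]
      by_cases hp : p w
      · rw [if_pos hp]
        have hcont : D.contains w = true := by
          rw [PySem.Dict.contains_eq_decide_mem_keys, hkeys]
          simp [hw, hp]
        rw [PySem.Dict.items_insert_of_contains _ _ hcont, ih, List.map_map]
        apply List.map_congr_left
        intro u hu
        by_cases h : u = w
        · subst h; simp
        · simp [h]
      · rw [if_neg hp]; exact ih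
    · rw [if_neg hw]
      by_cases hp : p w
      · rw [if_pos hp]
        have hcont : D.contains w = false := by
          rw [PySem.Dict.contains_eq_decide_mem_keys, hkeys]
          simp [hw]
        rw [PySem.Dict.items_insert_of_not_contains _ _ hcont, ih, List.filter_append,
            List.map_append]
        simp [hp]
      · rw [if_neg hp, List.filter_append]
        simp [hp, ih]

-- both pre-sort dicts have the same items: the retained first-occurrence words with their counts
theorem preSort_eq (wordsCleaned : List String) (minCount : Int) :
    ((wordsCleaned.foldl (fun u word => if word ∈ u then u else u ++ [word]) ([] : List String)).foldl
      (fun d wordUnique =>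
        if minCount ≤ (wordsCleaned.count wordUnique : Int) then
          d.insert wordUnique (wordsCleaned.count wordUnique : Int) else d)
      (PySem.Dict.empty : PySem.Dict String Int)).items
    = (wordsCleaned.foldl (fun d word =>
        if minCount ≤ (runLengthLoop (PySem.List.sorted wordsCleaned (fun w => w) false) PySem.Dict.empty).getD word 0 then
          d.insert word ((runLengthLoop (PySem.List.sorted wordsCleaned (fun w => w) false) PySem.Dict.empty).getD word 0)
        else d) (PySem.Dict.empty : PySem.Dict String Int)).items := by
  have huniq : wordsCleaned.foldl (fun u word => if word ∈ u then u else u ++ [word]) ([] : List String)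
      = PySem.Set.ofList wordsCleaned := by
    rw [PySem.Set.ofList_eq_foldl]
    refine PySem.List.foldl_congr_mem wordsCleaned _ _ _ ?_
    intro acc x _
    simp [PySem.Set.add, PySem.Set.contains]
  have hcnt : ∀ w ∈ wordsCleaned,
      (runLengthLoop (PySem.List.sorted wordsCleaned (fun w => w) false) PySem.Dict.empty).getD w 0
        = (wordsCleaned.count w : Int) := by
    intro w hw
    have hperm : (PySem.List.sorted wordsCleaned (fun w => w) false).Perm wordsCleaned :=
      PySem.List.sorted_perm wordsCleaned (fun w => w) false
    have hp : (PySem.List.sorted wordsCleaned (fun w => w) false).Pairwise (· ≤ ·) := by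
      simpa using PySem.List.sorted_pairwise wordsCleaned (fun w => w)
    rw [runLengthLoop_getD _ _ w hp, if_pos (hperm.mem_iff.mpr hw), hperm.count_eq]
  have hB : wordsCleaned.foldl (fun d word =>
        if minCount ≤ (runLengthLoop (PySem.List.sorted wordsCleaned (fun w => w) false) PySem.Dict.empty).getD word 0 then
          d.insert word ((runLengthLoop (PySem.List.sorted wordsCleaned (fun w => w) false) PySem.Dict.empty).getD word 0)
        else d) (PySem.Dict.empty : PySem.Dict String Int)
      = wordsCleaned.foldl (fun d word =>
        if minCount ≤ (wordsCleaned.count word : Int) then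
          d.insert word (wordsCleaned.count word : Int) else d) (PySem.Dict.empty : PySem.Dict String Int) := by
    refine PySem.List.foldl_congr_mem wordsCleaned _ _ _ ?_
    intro acc x hx
    rw [hcnt x hx]
  rw [huniq, hB,
      items_cond_insert (fun w => minCount ≤ (wordsCleaned.count w : Int)) (fun w => (wordsCleaned.count w : Int)),
      items_cond_insert (fun w => minCount ≤ (wordsCleaned.count w : Int)) (fun w => (wordsCleaned.count w : Int)),
      PySem.Set.ofList_ofList]

-- ===== VERDICT (by name: the statement is the Claim_ definition above) =====
theorem analyzeWordsCount_spec : Claim_equal_analyzeWordsCount := by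
  intro xs m _
  unfold Spec_analyzeWordsCount analyzeWordsCount analyzeWordsCount_alt
  simp only [preSort_eq]
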